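-- pv_equiv track=rewrite | github.com/Ashiq-am/Data-Structures-Algorithm | 1.Python Algorithms/8.Bitwise Algorithms/1.Basic/62.Set the Left most unset bit/Set the Left most unset bit.py | setleftmostunsetbit
-- ===== SOURCE A (Python) =====
-- def setleftmostunsetbit(n):
--     # if number contain all
--     # 1 then return n
--     if not (n & (n + 1)):
--         return n
--
--     # Find position of leftmost unset bit
--     pos, temp, count = 0, n, 0
--
--     while temp:
--         # if temp L.S.B is zero
--         # then unset bit pos is
--         # change
--         if not (temp & 1):
--             pos = count
--
--         count += 1;
--         temp >>= 1
--
--     # return OR of number and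
--     # unset bit pos
--     return (n | (1 << (pos)))
-- ===== SOURCE B (Python) =====
-- def setleftmostunsetbit(n):
--     # all bits below the top set bit are 1 (or n == 0 / -1): nothing to set
--     if not (n & (n + 1)):
--         return n
--     bl = n.bit_length()
--     mask = n ^ ((1 << bl) - 1)          # the unset bits of n below its top set bit
--     return n | (1 << (mask.bit_length() - 1))
-- ===== Notes on version B (the rewrite author's own statement) =====
-- stated objective: simpler
-- what changed: The bit-by-bit while-loop scan for the leftmost unset bit is replaced by a closed-form computation: mask the complement of n below its bit_length and take that mask's bit_length minus one.
import Mathlib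
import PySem

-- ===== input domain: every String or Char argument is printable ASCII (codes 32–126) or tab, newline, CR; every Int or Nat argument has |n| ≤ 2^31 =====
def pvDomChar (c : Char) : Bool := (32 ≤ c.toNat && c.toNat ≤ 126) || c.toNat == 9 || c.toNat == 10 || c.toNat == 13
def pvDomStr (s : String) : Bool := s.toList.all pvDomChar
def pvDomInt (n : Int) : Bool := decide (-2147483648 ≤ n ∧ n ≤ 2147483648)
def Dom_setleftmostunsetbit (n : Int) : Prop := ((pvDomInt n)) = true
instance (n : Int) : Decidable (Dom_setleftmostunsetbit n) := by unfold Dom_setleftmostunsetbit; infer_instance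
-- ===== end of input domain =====

-- B replaces A's bit-by-bit while-loop scan with a closed-form bit-length/mask computation (objective: simpler).

-- ===== PORT A =====
-- A's while loop: each step inspects the LSB (temp & 1) and shifts right (temp >>= 1).
-- Inside Pre_ the loop only runs for n ≥ 0 (for n < -1 Python's `while temp` never terminates),
-- so it is transcribed over temp = n.toNat; on naturals &&& 1 and >>> 1 are exact.
def loopA (temp pos count : Nat) : Nat :=
  if temp = 0 then pos
  else loopA (temp >>> 1) (if temp &&& 1 = 0 then count else pos) (count + 1)
termination_by temp
decreasing_by
  rw [Nat.shiftRight_one]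
  exact Nat.div_lt_self (Nat.pos_of_ne_zero (by assumption)) one_lt_two

def setleftmostunsetbit (n : Int) : Int :=
  if PySem.Int.band n (n + 1) == 0 then n
  else
    let pos := loopA n.toNat 0 0
    PySem.Int.bor n ((1 : Int) <<< pos)

-- ===== PORT B =====
-- transliteration of Source B: bit_length → PySem.Int.bitLength, & | ^ → PySem.Int.band/bor/bxor
def setleftmostunsetbit_alt (n : Int) : Int :=
  if PySem.Int.band n (n + 1) == 0 then n
  else
    let bl := PySem.Int.bitLength n
    let mask := PySem.Int.bxor n ((1 : Int) <<< bl - 1)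
    PySem.Int.bor n ((1 : Int) <<< (PySem.Int.bitLength mask - 1))

-- ===== PRECONDITION & SPEC =====
-- Pre_ excludes n < -1, on which Python A's `while temp` loop never terminates
-- (temp >>= 1 stays negative forever), so A returns nothing there.
def Pre_setleftmostunsetbit (n : Int) : Prop := -1 ≤ n
instance (n : Int) : Decidable (Pre_setleftmostunsetbit n) := by unfold Pre_setleftmostunsetbit; infer_instance
def pvWitness_setleftmostunsetbit : Int := 5

def Spec_setleftmostunsetbit (n : Int) (out : Int) : Prop := out = setleftmostunsetbit_alt n
instance (n : Int) (out : Int) : Decidable (Spec_setleftmostunsetbit n out) := by unfold Spec_setleftmostunsetbit; infer_instance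

-- ===== CLAIM (what is proved, stated in full; the proofs are below) =====
def Claim_equal_setleftmostunsetbit : Prop := ∀ (n : Int), Dom_setleftmostunsetbit n → Pre_setleftmostunsetbit n → Spec_setleftmostunsetbit n (setleftmostunsetbit n)

-- ===== LEMMAS AND PROOFS =====

-- the unset bits of t below its bit length
def maskOf (t : Nat) : Nat := t ^^^ (2 ^ Nat.size t - 1)

theorem size_half (t : Nat) (h : t ≠ 0) : Nat.size t = Nat.size (t / 2) + 1 := by
  have key : ∀ k : Nat, Nat.size t ≤ k + 1 ↔ Nat.size (t / 2) ≤ k := by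
    intro k
    rw [Nat.size_le, Nat.size_le, Nat.div_lt_iff_lt_mul (by norm_num : 0 < 2)]
    rw [pow_succ]
  have hpos : 0 < Nat.size t := Nat.size_pos.mpr (Nat.pos_of_ne_zero h)
  have h1 : Nat.size t ≤ Nat.size (t / 2) + 1 := (key _).mpr le_rfl
  have h2 : Nat.size (t / 2) ≤ Nat.size t - 1 := (key (Nat.size t - 1)).mp (by omega)
  omega

theorem two_mul_add_xor (a c b d : Nat) (hb : b < 2) (hd : d < 2) :
    (2 * a + b) ^^^ (2 * c + d) = 2 * (a ^^^ c) + (b ^^^ d) := by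
  have hb' : b = 0 ∨ b = 1 := by omega
  have hd' : d = 0 ∨ d = 1 := by omega
  rcases hb' with rfl | rfl <;> rcases hd' with rfl | rfl
  · simpa [Nat.bit_val] using Nat.xor_bit false a false c
  · simpa [Nat.bit_val] using Nat.xor_bit false a true c
  · simpa [Nat.bit_val] using Nat.xor_bit true a false c
  · simpa [Nat.bit_val] using Nat.xor_bit true a true c

theorem mask_rec (t : Nat) (h : t ≠ 0) :
    maskOf t = 2 * maskOf (t / 2) + (if t % 2 = 0 then 1 else 0) := by
  obtain ⟨a, r, hr, ht⟩ : ∃ a r, r < 2 ∧ t = 2 * a + r := ⟨t / 2, t % 2, by omega, by omega⟩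
  subst ht
  have hda : (2 * a + r) / 2 = a := by omega
  have hma : (2 * a + r) % 2 = r := by omega
  have hs := size_half (2 * a + r) h
  rw [hda] at hs
  have hp : 0 < 2 ^ Nat.size a := Nat.pow_pos (by norm_num)
  have h2 : 2 ^ Nat.size (2 * a + r) - 1 = 2 * (2 ^ Nat.size a - 1) + 1 := by
    rw [hs, pow_succ]; omega
  unfold maskOf
  rw [hda, hma, h2, two_mul_add_xor a _ r 1 hr (by norm_num)]
  have hr' : r = 0 ∨ r = 1 := by omega
  rcases hr' with rfl | rfl <;> simp

theorem loopA_eq (t : Nat) : ∀ pos count : Nat,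
    loopA t pos count = if maskOf t = 0 then pos else count + (Nat.size (maskOf t) - 1) := by
  induction t using Nat.strong_induction_on with
  | _ t ih =>
    intro pos count
    by_cases h : t = 0
    · subst h; rw [loopA]; simp [maskOf]
    · rw [loopA]
      simp only [h]
      have hlt : t >>> 1 < t := by
        rw [Nat.shiftRight_one]
        exact Nat.div_lt_self (Nat.pos_of_ne_zero h) one_lt_two
      rw [ih _ hlt]
      rw [Nat.shiftRight_one, Nat.and_one_is_mod]
      have hmr := mask_rec t h
      by_cases hM : maskOf (t / 2) = 0
      · rw [hM] at hmr
        by_cases he : t % 2 = 0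
        · have h1 : maskOf t = 1 := by rw [hmr, he]; simp
          simp [hM, h1, he, Nat.size_one]
        · have h0 : maskOf t = 0 := by rw [hmr]; simp [he]
          simp [hM, h0, he]
      · have hb : (if t % 2 = 0 then 1 else 0) < 2 := by split <;> omega
        have hMne : maskOf t ≠ 0 := by rw [hmr]; omega
        have hsz : Nat.size (maskOf t) = Nat.size (maskOf (t / 2)) + 1 := by
          rw [hmr]
          have h0 : 2 * maskOf (t / 2) + (if t % 2 = 0 then 1 else 0) ≠ 0 := by omega
          have := size_half _ h0
          have hd : (2 * maskOf (t / 2) + (if t % 2 = 0 then 1 else 0)) / 2 = maskOf (t / 2) := by omega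
          rw [hd] at this; exact this
        have hszpos : 0 < Nat.size (maskOf (t / 2)) := Nat.size_pos.mpr (Nat.pos_of_ne_zero hM)
        simp only [hM, if_false, hMne, hsz]
        omega

theorem loopA_final (m : Nat) : loopA m 0 0 = Nat.size (maskOf m) - 1 := by
  rw [loopA_eq]
  by_cases h : maskOf m = 0
  · rw [if_pos h, h, Nat.size_zero]
  · rw [if_neg h, Nat.zero_add]

theorem bitLength_eq_size (m : Nat) : PySem.Int.bitLength (m : Int) = Nat.size m := by
  induction m using Nat.strong_induction_on with
  | _ m ih =>
    by_cases h : m = 0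
    · subst h; simp [PySem.Int.bitLength_zero, Nat.size_zero]
    · rw [PySem.Int.bitLength_natCast (Nat.pos_of_ne_zero h),
        ih (m / 2) (Nat.div_lt_self (Nat.pos_of_ne_zero h) one_lt_two),
        ← size_half m h]

theorem int_one_shiftLeft (k : Nat) : (1 : Int) <<< k = ((2 ^ k : Nat) : Int) := by
  rw [← Int.shiftLeft_natCast_right, Int.shiftLeft_eq_mul_pow]
  push_cast; ring

-- ===== VERDICT (by name: the statement is the Claim_ definition above) =====
theorem setleftmostunsetbit_spec : Claim_equal_setleftmostunsetbit := by
  intro n _ hpre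
  unfold Spec_setleftmostunsetbit setleftmostunsetbit setleftmostunsetbit_alt
  by_cases h : (PySem.Int.band n (n + 1) == 0) = true
  · simp [h]
  · simp only [h]
    -- the guard catches n = -1, so here n ≥ 0
    have hn : 0 ≤ n := by
      rcases lt_or_ge n 0 with hlt | hge
      · exfalso
        have : n = -1 := by unfold Pre_setleftmostunsetbit at hpre; omega
        subst this
        simp [show (-1 : Int) + 1 = 0 by ring] at h
      · exact hge
    obtain ⟨m, rfl⟩ : ∃ m : Nat, n = (m : Int) := ⟨n.toNat, by omega⟩
    have htn : (m : Int).toNat = m := by omega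
    rw [htn, loopA_final, bitLength_eq_size, int_one_shiftLeft]
    have hcast : ((m : Int) + 1) = ((m + 1 : Nat) : Int) := by push_cast; ring
    have hmask : PySem.Int.bxor (m : Int) ((1 : Int) <<< Nat.size m - 1)
        = ((maskOf m : Nat) : Int) := by
      rw [int_one_shiftLeft]
      have hge1 : (1 : Nat) ≤ 2 ^ Nat.size m := Nat.one_le_two_pow
      have : ((2 ^ Nat.size m : Nat) : Int) - 1 = ((2 ^ Nat.size m - 1 : Nat) : Int) := by
        push_cast [hge1]; ring
      rw [this, PySem.Int.bxor_natCast, maskOf]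
    rw [hmask, bitLength_eq_size, int_one_shiftLeft, PySem.Int.bor_natCast]
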